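-- pv_equiv track=rewrite | github.com/gwvdh/triangle_folds | triangle_folds/grid.py | get_square_coordinate
-- ===== SOURCE A (Python) =====
-- from typing import Dict, Tuple, List
--
-- def get_square_coordinate(bit_string: int, start: Tuple[int, int], length: int) -> Tuple[int, int]:
--     direction: str = 'NE'
--     x_coordinate: int = start[0]
--     y_coordinate: int = start[1]
--     for crease in range(length):
--         if bit_string & (1 << crease):
--             if crease % 2 == 0:
--                 if 'N' in direction:
--                     direction = direction.replace('N', 'S')
--                 else:
--                     direction = direction.replace('S', 'N')
--             else:
--                 if 'W' in direction:
--                     direction = direction.replace('W', 'E')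
--                 else:
--                     direction = direction.replace('E', 'W')
--         else:
--             if crease % 2 == 0:
--                 if 'N' in direction:
--                     y_coordinate = y_coordinate + 1
--                 else:
--                     y_coordinate = y_coordinate - 1
--             else:
--                 if 'E' in direction:
--                     x_coordinate = x_coordinate + 1
--                 else:
--                     x_coordinate = x_coordinate - 1
--     return x_coordinate, y_coordinate
-- ===== SOURCE B (Python) =====
-- def get_square_coordinate(bit_string, start, length):
--     dx = dy = 0
--     for crease in reversed(range(length)):
--         if crease % 2 == 0:
--             dy = -dy if bit_string & (1 << crease) else dy + 1
--         else:
--             dx = -dx if bit_string & (1 << crease) else dx + 1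
--     return start[0] + dx, start[1] + dy
-- ===== Notes on version B (the rewrite author's own statement) =====
-- stated objective: alternative
-- what changed: Instead of simulating the fold forwards with a mutable direction state, B traverses the creases back-to-front accumulating pure displacements (dx, dy) with no direction/sign state at all: a set bit negates the displacement accumulated so far for its axis, a clear bit adds 1; the start coordinate is added only at the end.
import Mathlib
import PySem

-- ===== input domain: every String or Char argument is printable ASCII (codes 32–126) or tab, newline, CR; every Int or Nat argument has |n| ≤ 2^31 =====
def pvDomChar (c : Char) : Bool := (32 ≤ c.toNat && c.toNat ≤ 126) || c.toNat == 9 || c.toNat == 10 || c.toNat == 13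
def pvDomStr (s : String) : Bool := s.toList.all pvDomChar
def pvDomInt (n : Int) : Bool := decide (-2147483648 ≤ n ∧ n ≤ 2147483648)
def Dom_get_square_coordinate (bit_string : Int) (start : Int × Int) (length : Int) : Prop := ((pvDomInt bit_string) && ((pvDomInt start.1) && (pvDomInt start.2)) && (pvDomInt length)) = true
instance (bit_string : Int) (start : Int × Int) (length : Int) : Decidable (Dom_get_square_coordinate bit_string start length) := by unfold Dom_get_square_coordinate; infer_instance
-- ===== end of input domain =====

-- B replaces A's forward simulation with a mutable direction state by a back-to-front pass
-- that accumulates pure displacements (a set bit negates the later displacement of its axis,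
-- a clear bit adds 1), adding the start coordinate only at the end; objective: alternative.


-- ===== PORT A =====
-- one iteration of A's loop body; crease comes from range(length), so crease ≥ 0 and
-- Python's '1 << crease' is 1 <<< crease.toNat (exact there)
def aStep (bit_string : Int) (st : String × Int × Int) (crease : Int) : String × Int × Int :=
  match st with
  | (direction, x, y) =>
    if PySem.Int.band bit_string (1 <<< crease.toNat) ≠ 0 then
      if PySem.Int.mod crease 2 = 0 then
        if PySem.Str.isIn "N" direction then (PySem.Str.replace direction "N" "S", x, y)
        else (PySem.Str.replace direction "S" "N", x, y)
      else
        if PySem.Str.isIn "W" direction then (PySem.Str.replace direction "W" "E", x, y)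
        else (PySem.Str.replace direction "E" "W", x, y)
    else
      if PySem.Int.mod crease 2 = 0 then
        if PySem.Str.isIn "N" direction then (direction, x, y + 1)
        else (direction, x, y - 1)
      else
        if PySem.Str.isIn "E" direction then (direction, x + 1, y)
        else (direction, x - 1, y)

def get_square_coordinate (bit_string : Int) (start : Int × Int) (length : Int) : Int × Int :=
  let st := (PySem.List.pyRange 0 length 1).foldl (aStep bit_string) ("NE", start.1, start.2)
  (st.2.1, st.2.2)

-- ===== PORT B =====
-- one iteration of B's loop: state (dx, dy); the loop runs over reversed(range(length))
def bStep (bit_string : Int) (st : Int × Int) (crease : Int) : Int × Int :=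
  match st with
  | (dx, dy) =>
    if PySem.Int.mod crease 2 = 0 then
      (dx, if PySem.Int.band bit_string (1 <<< crease.toNat) ≠ 0 then -dy else dy + 1)
    else
      ((if PySem.Int.band bit_string (1 <<< crease.toNat) ≠ 0 then -dx else dx + 1), dy)

def get_square_coordinate_alt (bit_string : Int) (start : Int × Int) (length : Int) : Int × Int :=
  let d := ((PySem.List.pyRange 0 length 1).reverse).foldl (bStep bit_string) (0, 0)
  (start.1 + d.1, start.2 + d.2)

-- ===== PRECONDITION & SPEC =====
def Spec_get_square_coordinate (bit_string : Int) (start : Int × Int) (length : Int) (out : Int × Int) : Prop := out = get_square_coordinate_alt bit_string start length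
instance (bit_string : Int) (start : Int × Int) (length : Int) (out : Int × Int) : Decidable (Spec_get_square_coordinate bit_string start length out) := by unfold Spec_get_square_coordinate; infer_instance

-- ===== CLAIM (what is proved, stated in full; the proofs are below) =====
def Claim_equal_get_square_coordinate : Prop := ∀ (bit_string : Int) (start : Int × Int) (length : Int), Dom_get_square_coordinate bit_string start length → Spec_get_square_coordinate bit_string start length (get_square_coordinate bit_string start length)

-- ===== LEMMAS AND PROOFS =====

-- the direction string A carries, as a function of two ±1 signs
def dirOf (sy sx : Int) : String :=
  if sy = 1 then (if sx = 1 then "NE" else "NW")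
  else (if sx = 1 then "SE" else "SW")

-- proof-side backward accumulator extending B's (dx, dy) by the two sign products
-- (px, py = (-1)^(number of set odd/even bits)) needed to track A's direction:
-- state (py, dy, px, dx), folded from the right over the crease list
def bwdStep (bit_string : Int) (crease : Int) (st : Int × Int × Int × Int) : Int × Int × Int × Int :=
  match st with
  | (py, dy, px, dx) =>
    if PySem.Int.mod crease 2 = 0 then
      if PySem.Int.band bit_string (1 <<< crease.toNat) ≠ 0 then (-py, -dy, px, dx)
      else (py, dy + 1, px, dx)
    else
      if PySem.Int.band bit_string (1 <<< crease.toNat) ≠ 0 then (py, dy, -px, -dx)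
      else (py, dy, px, dx + 1)

def bwd (bit_string : Int) (l : List Int) : Int × Int × Int × Int :=
  l.foldr (bwdStep bit_string) (1, 0, 1, 0)

theorem bwd_cons (bs c : Int) (t : List Int) :
    bwd bs (c :: t) = bwdStep bs c (bwd bs t) := rfl

-- B's foldr is the (dx, dy) projection of bwd
theorem b_proj (bs : Int) (l : List Int) :
    l.foldr (fun c st => bStep bs st c) ((0 : Int), (0 : Int)) =
      ((bwd bs l).2.2.2, (bwd bs l).2.1) := by
  induction l with
  | nil => rfl
  | cons c t ih =>
    rw [List.foldr_cons, ih, bwd_cons]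
    simp only [bStep, bwdStep]
    split_ifs <;> rfl

-- A's four loop-body outcomes, expressed through dirOf
theorem flipNS (bs a sy sx x y : Int) (h1 : sy = 1 ∨ sy = -1) (h2 : sx = 1 ∨ sx = -1)
    (hbit : PySem.Int.band bs (1 <<< a.toNat) ≠ 0) (hmod : PySem.Int.mod a 2 = 0) :
    aStep bs (dirOf sy sx, x, y) a = (dirOf (-sy) sx, x, y) := by
  rcases h1 with rfl | rfl <;> rcases h2 with rfl | rfl
  · simp only [aStep]
    rw [if_pos hbit, if_pos hmod,
        show dirOf 1 1 = "NE" from rfl,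
        if_pos (show PySem.Str.isIn "N" "NE" = true by decide),
        show PySem.Str.replace "NE" "N" "S" = "SE" by decide,
        show dirOf (-1) 1 = "SE" from rfl]
  · simp only [aStep]
    rw [if_pos hbit, if_pos hmod,
        show dirOf 1 (-1) = "NW" from rfl,
        if_pos (show PySem.Str.isIn "N" "NW" = true by decide),
        show PySem.Str.replace "NW" "N" "S" = "SW" by decide,
        show dirOf (-1) (-1) = "SW" from rfl]
  · simp only [aStep]
    rw [if_pos hbit, if_pos hmod,
        show dirOf (-1) 1 = "SE" from rfl,
        if_neg (show ¬ PySem.Str.isIn "N" "SE" = true by decide),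
        show PySem.Str.replace "SE" "S" "N" = "NE" by decide,
        show dirOf (-(-1)) 1 = "NE" from rfl]
  · simp only [aStep]
    rw [if_pos hbit, if_pos hmod,
        show dirOf (-1) (-1) = "SW" from rfl,
        if_neg (show ¬ PySem.Str.isIn "N" "SW" = true by decide),
        show PySem.Str.replace "SW" "S" "N" = "NW" by decide,
        show dirOf (-(-1)) (-1) = "NW" from rfl]

theorem moveY (bs a sy sx x y : Int) (h1 : sy = 1 ∨ sy = -1) (h2 : sx = 1 ∨ sx = -1)
    (hbit : ¬ PySem.Int.band bs (1 <<< a.toNat) ≠ 0) (hmod : PySem.Int.mod a 2 = 0) :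
    aStep bs (dirOf sy sx, x, y) a = (dirOf sy sx, x, y + sy) := by
  rcases h1 with rfl | rfl <;> rcases h2 with rfl | rfl
  · simp only [aStep]
    rw [if_neg hbit, if_pos hmod,
        show dirOf 1 1 = "NE" from rfl,
        if_pos (show PySem.Str.isIn "N" "NE" = true by decide)]
  · simp only [aStep]
    rw [if_neg hbit, if_pos hmod,
        show dirOf 1 (-1) = "NW" from rfl,
        if_pos (show PySem.Str.isIn "N" "NW" = true by decide)]
  · simp only [aStep]
    rw [if_neg hbit, if_pos hmod,
        show dirOf (-1) 1 = "SE" from rfl,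
        if_neg (show ¬ PySem.Str.isIn "N" "SE" = true by decide),
        show y + -1 = y - 1 from by ring]
  · simp only [aStep]
    rw [if_neg hbit, if_pos hmod,
        show dirOf (-1) (-1) = "SW" from rfl,
        if_neg (show ¬ PySem.Str.isIn "N" "SW" = true by decide),
        show y + -1 = y - 1 from by ring]

theorem flipEW (bs a sy sx x y : Int) (h1 : sy = 1 ∨ sy = -1) (h2 : sx = 1 ∨ sx = -1)
    (hbit : PySem.Int.band bs (1 <<< a.toNat) ≠ 0) (hmod : PySem.Int.mod a 2 = 1) :
    aStep bs (dirOf sy sx, x, y) a = (dirOf sy (-sx), x, y) := by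
  rcases h1 with rfl | rfl <;> rcases h2 with rfl | rfl
  · simp only [aStep]
    rw [if_pos hbit, if_neg (show ¬ PySem.Int.mod a 2 = 0 by omega),
        show dirOf 1 1 = "NE" from rfl,
        if_neg (show ¬ PySem.Str.isIn "W" "NE" = true by decide),
        show PySem.Str.replace "NE" "E" "W" = "NW" by decide,
        show dirOf 1 (-1) = "NW" from rfl]
  · simp only [aStep]
    rw [if_pos hbit, if_neg (show ¬ PySem.Int.mod a 2 = 0 by omega),
        show dirOf 1 (-1) = "NW" from rfl,
        if_pos (show PySem.Str.isIn "W" "NW" = true by decide),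
        show PySem.Str.replace "NW" "W" "E" = "NE" by decide,
        show dirOf 1 (-(-1)) = "NE" from rfl]
  · simp only [aStep]
    rw [if_pos hbit, if_neg (show ¬ PySem.Int.mod a 2 = 0 by omega),
        show dirOf (-1) 1 = "SE" from rfl,
        if_neg (show ¬ PySem.Str.isIn "W" "SE" = true by decide),
        show PySem.Str.replace "SE" "E" "W" = "SW" by decide,
        show dirOf (-1) (-1) = "SW" from rfl]
  · simp only [aStep]
    rw [if_pos hbit, if_neg (show ¬ PySem.Int.mod a 2 = 0 by omega),
        show dirOf (-1) (-1) = "SW" from rfl,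
        if_pos (show PySem.Str.isIn "W" "SW" = true by decide),
        show PySem.Str.replace "SW" "W" "E" = "SE" by decide,
        show dirOf (-1) (-(-1)) = "SE" from rfl]

theorem moveX (bs a sy sx x y : Int) (h1 : sy = 1 ∨ sy = -1) (h2 : sx = 1 ∨ sx = -1)
    (hbit : ¬ PySem.Int.band bs (1 <<< a.toNat) ≠ 0) (hmod : PySem.Int.mod a 2 = 1) :
    aStep bs (dirOf sy sx, x, y) a = (dirOf sy sx, x + sx, y) := by
  rcases h1 with rfl | rfl <;> rcases h2 with rfl | rfl
  · simp only [aStep]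
    rw [if_neg hbit, if_neg (show ¬ PySem.Int.mod a 2 = 0 by omega),
        show dirOf 1 1 = "NE" from rfl,
        if_pos (show PySem.Str.isIn "E" "NE" = true by decide)]
  · simp only [aStep]
    rw [if_neg hbit, if_neg (show ¬ PySem.Int.mod a 2 = 0 by omega),
        show dirOf 1 (-1) = "NW" from rfl,
        if_neg (show ¬ PySem.Str.isIn "E" "NW" = true by decide),
        show x + -1 = x - 1 from by ring]
  · simp only [aStep]
    rw [if_neg hbit, if_neg (show ¬ PySem.Int.mod a 2 = 0 by omega),
        show dirOf (-1) 1 = "SE" from rfl,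
        if_pos (show PySem.Str.isIn "E" "SE" = true by decide)]
  · simp only [aStep]
    rw [if_neg hbit, if_neg (show ¬ PySem.Int.mod a 2 = 0 by omega),
        show dirOf (-1) (-1) = "SW" from rfl,
        if_neg (show ¬ PySem.Str.isIn "E" "SW" = true by decide),
        show x + -1 = x - 1 from by ring]

-- core simulation: A's forward fold from signs (sy, sx) equals the backward accumulator,
-- scaled by the incoming signs and offset by the incoming coordinates
theorem main_sim (bs : Int) (n : Nat) : ∀ (a : Int), 0 ≤ a →
    ∀ (sy sx x y : Int), (sy = 1 ∨ sy = -1) → (sx = 1 ∨ sx = -1) →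
    (PySem.List.pyRange a (a + n) 1).foldl (aStep bs) (dirOf sy sx, x, y) =
      (dirOf (sy * (bwd bs (PySem.List.pyRange a (a + n) 1)).1)
             (sx * (bwd bs (PySem.List.pyRange a (a + n) 1)).2.2.1),
       x + sx * (bwd bs (PySem.List.pyRange a (a + n) 1)).2.2.2,
       y + sy * (bwd bs (PySem.List.pyRange a (a + n) 1)).2.1) := by
  induction n with
  | zero =>
    intro a _ sy sx x y _ _
    simp only [Nat.cast_zero, add_zero]
    rw [PySem.List.pyRange_one_eq_nil (le_refl a)]
    simp [bwd]
  | succ m ih =>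
    intro a ha sy sx x y hsy hsx
    rw [show ((m + 1 : Nat) : Int) = (m : Int) + 1 by push_cast; ring]
    have hb : a < a + ((m : Int) + 1) := by omega
    rw [PySem.List.pyRange_one_cons hb,
        show a + ((m : Int) + 1) = (a + 1) + (m : Int) by ring]
    rw [List.foldl_cons, bwd_cons]
    by_cases hpar : a % 2 = 0
    · have hmod : PySem.Int.mod a 2 = 0 := by
        rw [PySem.Int.mod_eq_emod_of_pos (by norm_num)]; omega
      by_cases hbit : PySem.Int.band bs (1 <<< a.toNat) ≠ 0
      · rw [flipNS bs a sy sx x y hsy hsx hbit hmod,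
            ih (a + 1) (by omega) (-sy) sx x y (by omega) hsx]
        simp only [bwdStep, if_pos hmod, if_pos hbit, neg_mul, mul_neg]
      · rw [moveY bs a sy sx x y hsy hsx hbit hmod,
            ih (a + 1) (by omega) sy sx x (y + sy) hsy hsx]
        simp only [bwdStep, if_pos hmod, if_neg hbit, Prod.mk.injEq]
        exact ⟨trivial, trivial, by ring⟩
    · have hmod : PySem.Int.mod a 2 = 1 := by
        rw [PySem.Int.mod_eq_emod_of_pos (by norm_num)]; omega
      by_cases hbit : PySem.Int.band bs (1 <<< a.toNat) ≠ 0
      · rw [flipEW bs a sy sx x y hsy hsx hbit hmod,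
            ih (a + 1) (by omega) sy (-sx) x y hsy (by omega)]
        simp only [bwdStep, if_neg (show ¬ PySem.Int.mod a 2 = 0 by omega), if_pos hbit,
          neg_mul, mul_neg]
      · rw [moveX bs a sy sx x y hsy hsx hbit hmod,
            ih (a + 1) (by omega) sy sx (x + sx) y hsy hsx]
        simp only [bwdStep, if_neg (show ¬ PySem.Int.mod a 2 = 0 by omega), if_neg hbit,
          Prod.mk.injEq]
        exact ⟨trivial, by ring, trivial⟩

-- ===== VERDICT (by name: the statement is the Claim_ definition above) =====
theorem get_square_coordinate_spec : Claim_equal_get_square_coordinate := by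
  intro bs start length _
  unfold Spec_get_square_coordinate get_square_coordinate get_square_coordinate_alt
  rw [List.foldl_reverse, b_proj]
  by_cases hl : length ≤ 0
  · rw [PySem.List.pyRange_one_eq_nil (by omega)]
    simp [bwd]
  · have h0 : (0 : Int) + (length.toNat : Int) = length := by omega
    have := main_sim bs length.toNat 0 le_rfl 1 1 start.1 start.2 (Or.inl rfl) (Or.inl rfl)
    rw [h0, show dirOf 1 1 = "NE" from rfl] at this
    rw [this]
    simp
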